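-- pv_equiv track=rewrite | github.com/UIC-InDeXLab/FCS | generateLPParams.py | updatedShortestDistanceOverAnEdge
-- ===== SOURCE A (Python) =====
-- def updatedShortestDistanceOverAnEdge(edgeNodeDistances):
--     res = {}
--     for edge in edgeNodeDistances:
--         for node in edgeNodeDistances[edge]:
--             if node not in res:
--                 res[node] = edgeNodeDistances[edge][node]
--             elif edgeNodeDistances[edge][node] < res[node]:
--                 res[node] = edgeNodeDistances[edge][node]
--     return res
-- ===== SOURCE B (Python) =====
-- def updatedShortestDistanceOverAnEdge(edgeNodeDistances):
--     # Pass 1: group every distance by node (first-appearance key order).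
--     collected = {}
--     for nodeDistances in edgeNodeDistances.values():
--         for node, dist in nodeDistances.items():
--             collected.setdefault(node, []).append(dist)
--     # Pass 2: reduce each group to its minimum.
--     return {node: min(dists) for node, dists in collected.items()}
-- ===== Notes on version B (the rewrite author's own statement) =====
-- stated objective: alternative
-- what changed: Replaces the interleaved running-minimum dict update with two separate passes: first group all distances per node into lists (setdefault/append), then reduce each group with min() in a dict comprehension.
import Mathlib
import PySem

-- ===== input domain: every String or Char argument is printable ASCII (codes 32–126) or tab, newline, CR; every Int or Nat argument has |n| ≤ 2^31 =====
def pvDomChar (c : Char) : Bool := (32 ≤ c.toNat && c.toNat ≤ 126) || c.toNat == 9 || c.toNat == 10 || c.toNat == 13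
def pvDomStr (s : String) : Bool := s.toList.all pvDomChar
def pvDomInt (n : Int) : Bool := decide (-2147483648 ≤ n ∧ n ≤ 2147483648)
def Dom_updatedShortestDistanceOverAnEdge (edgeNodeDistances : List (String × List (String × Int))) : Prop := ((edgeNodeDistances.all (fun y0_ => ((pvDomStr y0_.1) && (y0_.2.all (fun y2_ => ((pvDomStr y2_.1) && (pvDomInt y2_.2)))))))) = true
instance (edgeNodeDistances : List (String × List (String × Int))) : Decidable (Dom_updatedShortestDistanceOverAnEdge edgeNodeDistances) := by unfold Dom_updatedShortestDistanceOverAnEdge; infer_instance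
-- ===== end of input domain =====

-- B replaces A's interleaved running-minimum update with two separate passes (group all
-- distances per node, then reduce each group with min): an alternative decomposition, same cost.
-- The assoc-list argument denotes the Python dict-of-dicts built from it (insertion order,
-- later duplicate keys overwrite in place), decoded identically at the top of both ports.

-- ===== PORT A =====
def updatedShortestDistanceOverAnEdge (edgeNodeDistances : List (String × List (String × Int))) : List (String × Int) :=
  let d : PySem.Dict String (PySem.Dict String Int) :=
    PySem.Dict.ofList (edgeNodeDistances.map (fun p => (p.1, PySem.Dict.ofList p.2)))
  -- res = {}; for edge in d: for node in d[edge]: running-minimum update on res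
  let res : PySem.Dict String Int :=
    d.items.foldl (fun res ep =>
      (d.getD ep.1 PySem.Dict.empty).items.foldl (fun res np =>
        if res.contains np.1 = false then
          res.insert np.1 ((d.getD ep.1 PySem.Dict.empty).getD np.1 0)
        else if (d.getD ep.1 PySem.Dict.empty).getD np.1 0 < res.getD np.1 0 then
          res.insert np.1 ((d.getD ep.1 PySem.Dict.empty).getD np.1 0)
        else res) res) PySem.Dict.empty
  res.items

-- ===== PORT B =====
def updatedShortestDistanceOverAnEdge_alt (edgeNodeDistances : List (String × List (String × Int))) : List (String × Int) :=
  let d : PySem.Dict String (PySem.Dict String Int) :=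
    PySem.Dict.ofList (edgeNodeDistances.map (fun p => (p.1, PySem.Dict.ofList p.2)))
  -- pass 1: collected.setdefault(node, []).append(dist) over all values of d
  let collected : PySem.Dict String (List Int) :=
    d.values.foldl (fun c nd =>
      nd.items.foldl (fun c np => c.modify np.1 [] (· ++ [np.2])) c) PySem.Dict.empty
  -- pass 2: {node: min(dists) for node, dists in collected.items()}
  (collected.items.foldl (fun r p =>
      r.insert p.1 ((PySem.List.min? p.2 (fun x => x)).getD 0)) PySem.Dict.empty).items

-- ===== PRECONDITION & SPEC =====
def Spec_updatedShortestDistanceOverAnEdge (edgeNodeDistances : List (String × List (String × Int))) (out : List (String × Int)) : Prop := out = updatedShortestDistanceOverAnEdge_alt edgeNodeDistances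
instance (edgeNodeDistances : List (String × List (String × Int))) (out : List (String × Int)) : Decidable (Spec_updatedShortestDistanceOverAnEdge edgeNodeDistances out) := by unfold Spec_updatedShortestDistanceOverAnEdge; infer_instance

-- ===== CLAIM (what is proved, stated in full; the proofs are below) =====
def Claim_equal_updatedShortestDistanceOverAnEdge : Prop := ∀ (edgeNodeDistances : List (String × List (String × Int))), Dom_updatedShortestDistanceOverAnEdge edgeNodeDistances → Spec_updatedShortestDistanceOverAnEdge edgeNodeDistances (updatedShortestDistanceOverAnEdge edgeNodeDistances)

-- ===== LEMMAS AND PROOFS =====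

-- A's loop body at one (node, dist) pair, after the dict lookups are resolved
def pvStepA (res : PySem.Dict String Int) (np : String × Int) : PySem.Dict String Int :=
  if res.contains np.1 = false then res.insert np.1 np.2
  else if np.2 < res.getD np.1 0 then res.insert np.1 np.2
  else res

-- running minimum on an optional accumulator
def pvMn (o : Option Int) (v : Int) : Option Int :=
  some (match o with | none => v | some m => min m v)

lemma pv_values_aux (xs : List (String × PySem.Dict String Int))
    (d : PySem.Dict String (PySem.Dict String Int))
    (hd : ∀ w ∈ d.values, w.keys.Nodup) (hx : ∀ x ∈ xs, x.2.keys.Nodup) :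
    ∀ w ∈ (xs.foldl (fun d x => d.insert x.1 x.2) d).values, w.keys.Nodup := by
  induction xs generalizing d with
  | nil => exact hd
  | cons x xs ih =>
    intro w hw
    refine ih (d.insert x.1 x.2) (fun w' hw' => ?_)
      (fun y hy => hx y (List.mem_cons_of_mem _ hy)) w hw
    rcases PySem.Dict.mem_values_insert d x.1 x.2 w' hw' with h | h
    · exact h ▸ hx x (List.mem_cons_self ..)
    · exact hd w' h

lemma pv_values_nodup (l : List (String × List (String × Int))) :
    ∀ ep ∈ (PySem.Dict.ofList (l.map (fun p => (p.1, PySem.Dict.ofList p.2)))).items,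
      ep.2.keys.Nodup := by
  intro ep hep
  have : ep.2 ∈ (PySem.Dict.ofList (l.map (fun p => (p.1, PySem.Dict.ofList p.2)))).values :=
    List.mem_map_of_mem hep
  rw [show PySem.Dict.ofList (l.map (fun p => (p.1, PySem.Dict.ofList p.2)))
      = (l.map (fun p => (p.1, PySem.Dict.ofList p.2))).foldl
          (fun d x => d.insert x.1 x.2) PySem.Dict.empty from rfl] at this
  refine pv_values_aux (l.map (fun p => (p.1, PySem.Dict.ofList p.2))) PySem.Dict.empty ?_ ?_ ep.2 this
  · intro w hw; simp [PySem.Dict.empty] at hw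
  · intro x hx
    rcases List.mem_map.mp hx with ⟨p, _, rfl⟩
    exact PySem.Dict.nodup_keys_ofList _

lemma pv_get_stepA_self (res : PySem.Dict String Int) (np : String × Int) :
    (pvStepA res np).get? np.1 = pvMn (res.get? np.1) np.2 := by
  unfold pvStepA pvMn
  cases hg : res.get? np.1 with
  | none =>
    have hc : res.contains np.1 = false := by
      rw [PySem.Dict.contains_eq_isSome_get?, hg]; rfl
    simp [hc, PySem.Dict.get?_insert_self]
  | some m =>
    have hc : res.contains np.1 = true := by
      rw [PySem.Dict.contains_eq_isSome_get?, hg]; rfl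
    have hgd : res.getD np.1 0 = m := PySem.Dict.getD_of_get?_eq_some res 0 hg
    simp only [hc, Bool.true_eq_false, if_false, hgd]
    split_ifs with h
    · rw [PySem.Dict.get?_insert_self]
      simp [min_eq_right (le_of_lt h)]
    · rw [hg]
      simp [min_eq_left (not_lt.mp h)]

lemma pv_get_stepA_ne (res : PySem.Dict String Int) (np : String × Int) (n : String)
    (h : n ≠ np.1) : (pvStepA res np).get? n = res.get? n := by
  unfold pvStepA
  split_ifs <;> first | rw [PySem.Dict.get?_insert_of_ne _ _ h] | rfl

lemma pv_keys_stepA_one (res : PySem.Dict String Int) (np : String × Int) :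
    (pvStepA res np).keys = PySem.Set.add res.keys np.1 := by
  unfold pvStepA
  by_cases hc : res.contains np.1
  · have hm : np.1 ∈ res.keys := (PySem.Dict.contains_iff_mem_keys res np.1).mp hc
    simp only [hc, Bool.true_eq_false, if_false, PySem.Set.add_of_mem hm]
    split_ifs with h
    · exact PySem.Dict.keys_insert_of_contains res np.2 hc
    · rfl
  · have hc' : res.contains np.1 = false := by simpa using hc
    have hm : np.1 ∉ res.keys := fun hm => hc ((PySem.Dict.contains_iff_mem_keys res np.1).mpr hm)
    simp only [hc', if_true, PySem.Set.add_of_not_mem hm]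
    exact PySem.Dict.keys_insert_of_not_contains res np.2 hc'

lemma pv_keys_stepA (F : List (String × Int)) :
    ∀ res : PySem.Dict String Int,
      (F.foldl pvStepA res).keys = PySem.Set.update res.keys (F.map (·.1)) := by
  induction F with
  | nil => intro res; simp [PySem.Set.update]
  | cons np F ih =>
    intro res
    rw [List.foldl_cons, ih, List.map_cons, PySem.Set.update_cons, pv_keys_stepA_one]

lemma pv_get_stepA (F : List (String × Int)) (n : String) :
    ∀ res : PySem.Dict String Int,
      (F.foldl pvStepA res).get? n
        = ((F.filter (fun p => p.1 == n)).map (·.2)).foldl pvMn (res.get? n) := by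
  induction F with
  | nil => intro res; rfl
  | cons np F ih =>
    intro res
    rw [List.foldl_cons, ih]
    by_cases hn : np.1 = n
    · have : (np :: F).filter (fun p => p.1 == n) = np :: F.filter (fun p => p.1 == n) := by
        simp [hn]
      rw [this, List.map_cons, List.foldl_cons, ← hn, pv_get_stepA_self]
    · have : (np :: F).filter (fun p => p.1 == n) = F.filter (fun p => p.1 == n) := by
        simp [hn]
      rw [this, pv_get_stepA_ne res np n (fun h => hn h.symm)]

lemma pv_minFold (t : List Int) : ∀ a : Int, t.foldl pvMn (some a) = some (t.foldl min a) := by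
  induction t with
  | nil => intro a; rfl
  | cons v t ih =>
    intro a
    rw [List.foldl_cons, List.foldl_cons]
    have : pvMn (some a) v = some (min a v) := rfl
    rw [this, ih]

lemma pv_minFold_min? (ds : List Int) (h : ds ≠ []) :
    ds.foldl pvMn none = some ((PySem.List.min? ds (fun x => x)).getD 0) := by
  cases ds with
  | nil => exact absurd rfl h
  | cons x t =>
    rw [List.foldl_cons, PySem.List.min?_id_cons]
    have : pvMn none x = some x := rfl
    rw [this, pv_minFold]
    rfl

lemma pv_filter_ne_nil (F : List (String × Int)) (n : String)
    (h : n ∈ F.map (·.1)) : F.filter (fun p => p.1 == n) ≠ [] := by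
  rcases List.mem_map.mp h with ⟨p, hp, rfl⟩
  exact List.ne_nil_of_mem (List.mem_filter.mpr ⟨hp, by simp⟩)

lemma pv_flatten_A (d : PySem.Dict String (PySem.Dict String Int))
    (hdnd : d.keys.Nodup) (hv : ∀ ep ∈ d.items, ep.2.keys.Nodup) :
    d.items.foldl (fun res ep =>
      (d.getD ep.1 PySem.Dict.empty).items.foldl (fun res np =>
        if res.contains np.1 = false then
          res.insert np.1 ((d.getD ep.1 PySem.Dict.empty).getD np.1 0)
        else if (d.getD ep.1 PySem.Dict.empty).getD np.1 0 < res.getD np.1 0 then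
          res.insert np.1 ((d.getD ep.1 PySem.Dict.empty).getD np.1 0)
        else res) res) PySem.Dict.empty
    = ((d.items.map (fun ep => ep.2.items)).flatten).foldl pvStepA PySem.Dict.empty := by
  have h : ∀ ep ∈ d.items, ∀ res : PySem.Dict String Int,
      (d.getD ep.1 PySem.Dict.empty).items.foldl (fun res np =>
        if res.contains np.1 = false then
          res.insert np.1 ((d.getD ep.1 PySem.Dict.empty).getD np.1 0)
        else if (d.getD ep.1 PySem.Dict.empty).getD np.1 0 < res.getD np.1 0 then
          res.insert np.1 ((d.getD ep.1 PySem.Dict.empty).getD np.1 0)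
        else res) res
      = ep.2.items.foldl pvStepA res := by
    intro ep hep res
    have h1 : d.getD ep.1 PySem.Dict.empty = ep.2 :=
      PySem.Dict.getD_of_mem_items d (by simpa using hep) hdnd _
    rw [h1]
    refine PySem.List.foldl_congr_mem' _ _ _ _ ?_
    intro np hnp res'
    have h2 : ep.2.getD np.1 0 = np.2 :=
      PySem.Dict.getD_of_mem_items ep.2 (by simpa using hnp) (hv ep hep) _
    rw [h2]; rfl
  rw [PySem.List.foldl_congr_mem' d.items _
    (fun res ep => ep.2.items.foldl pvStepA res) PySem.Dict.empty h,
    List.foldl_flatten, List.foldl_map]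

lemma pv_flatten_B (d : PySem.Dict String (PySem.Dict String Int)) :
    d.values.foldl (fun c nd =>
      nd.items.foldl (fun c np => c.modify np.1 [] (· ++ [np.2])) c) PySem.Dict.empty
    = ((d.items.map (fun ep => ep.2.items)).flatten).foldl
        (fun c np => c.modify np.1 [] (· ++ [np.2])) PySem.Dict.empty := by
  rw [List.foldl_flatten, List.foldl_map,
    show d.values = d.items.map (·.2) from rfl, List.foldl_map]

lemma pv_main (d : PySem.Dict String (PySem.Dict String Int))
    (hdnd : d.keys.Nodup) (hv : ∀ ep ∈ d.items, ep.2.keys.Nodup) :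
    (d.items.foldl (fun res ep =>
      (d.getD ep.1 PySem.Dict.empty).items.foldl (fun res np =>
        if res.contains np.1 = false then
          res.insert np.1 ((d.getD ep.1 PySem.Dict.empty).getD np.1 0)
        else if (d.getD ep.1 PySem.Dict.empty).getD np.1 0 < res.getD np.1 0 then
          res.insert np.1 ((d.getD ep.1 PySem.Dict.empty).getD np.1 0)
        else res) res) PySem.Dict.empty).items
    = ((d.values.foldl (fun c nd =>
        nd.items.foldl (fun c np => c.modify np.1 [] (· ++ [np.2])) c)
          PySem.Dict.empty).items.foldl (fun r p =>
        r.insert p.1 ((PySem.List.min? p.2 (fun x => x)).getD 0)) PySem.Dict.empty).items := by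
  rw [pv_flatten_A d hdnd hv, pv_flatten_B d]
  generalize (d.items.map (fun ep => ep.2.items)).flatten = F
  -- A side
  have hAkeys : (F.foldl pvStepA PySem.Dict.empty).keys
      = PySem.Set.ofList (F.map (·.1)) := by
    rw [pv_keys_stepA, PySem.Dict.keys_empty, PySem.Set.update_nil_left]
  have hAnd : (F.foldl pvStepA PySem.Dict.empty).keys.Nodup := by
    rw [hAkeys]; exact PySem.Set.nodup_ofList _
  -- B side
  have hCkeys : (F.foldl (fun c np => c.modify np.1 [] (· ++ [np.2]))
      PySem.Dict.empty).keys = PySem.Set.ofList (F.map (·.1)) := by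
    have := PySem.Dict.keys_foldl_modify_key F (fun np => np.1)
      ([] : List Int) (fun _ np => (· ++ [np.2])) PySem.Dict.empty
    simp only [] at this
    rw [this, PySem.Dict.keys_empty, PySem.Set.update_nil_left]
  have hCnd : (F.foldl (fun c np => c.modify np.1 [] (· ++ [np.2]))
      PySem.Dict.empty).keys.Nodup := by
    rw [hCkeys]; exact PySem.Set.nodup_ofList _
  have hCget : ∀ n, (F.foldl (fun c np => c.modify np.1 [] (· ++ [np.2]))
      PySem.Dict.empty).getD n []
      = (F.filter (fun p => p.1 == n)).map (·.2) := by
    intro n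
    rw [PySem.Dict.getD_foldl_modify_append F PySem.Dict.empty n,
      PySem.Dict.getD_empty, List.nil_append]
  -- B's pass 2 appends fresh distinct keys
  have hfresh : ((F.foldl (fun c np => c.modify np.1 [] (· ++ [np.2]))
        PySem.Dict.empty).items.foldl (fun r p =>
        r.insert p.1 ((PySem.List.min? p.2 (fun x => x)).getD 0)) PySem.Dict.empty).items
      = (F.foldl (fun c np => c.modify np.1 [] (· ++ [np.2]))
          PySem.Dict.empty).items.map
            (fun p => (p.1, (PySem.List.min? p.2 (fun x => x)).getD 0)) := by
    have := PySem.Dict.items_foldl_insert_fresh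
      ((F.foldl (fun c np => c.modify np.1 [] (· ++ [np.2])) PySem.Dict.empty).items)
      (fun p => p.1) (fun p => (PySem.List.min? p.2 (fun x => x)).getD 0)
      PySem.Dict.empty (fun a _ => PySem.Dict.contains_empty _)
      (by simpa [PySem.Dict.keys] using hCnd)
    simp only [] at this
    rw [this]
    simp [PySem.Dict.empty]
  rw [hfresh,
    PySem.Dict.items_eq_map_keys _ hAnd 0,
    PySem.Dict.items_eq_map_keys _ hCnd [], List.map_map, hAkeys, hCkeys]
  refine List.map_congr_left ?_
  intro n hn
  simp only [Function.comp]
  congr 1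
  have hds : F.filter (fun p => p.1 == n) ≠ [] :=
    pv_filter_ne_nil F n ((PySem.Set.mem_ofList _ n).mp hn)
  have hmapne : (F.filter (fun p => p.1 == n)).map (·.2) ≠ [] := by
    simpa using hds
  rw [PySem.Dict.getD_eq_get?_getD, pv_get_stepA, PySem.Dict.get?_empty,
    hCget n, pv_minFold_min? _ hmapne]
  rfl

-- ===== VERDICT (by name: the statement is the Claim_ definition above) =====
theorem updatedShortestDistanceOverAnEdge_spec : Claim_equal_updatedShortestDistanceOverAnEdge := by
  intro e _
  unfold Spec_updatedShortestDistanceOverAnEdge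
  unfold updatedShortestDistanceOverAnEdge updatedShortestDistanceOverAnEdge_alt
  exact pv_main _ (PySem.Dict.nodup_keys_ofList _) (pv_values_nodup e)
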